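-- pv_equiv track=rewrite | github.com/krloer/CTF | patriotCTF/rev/garbage/solve.py | rev_stage3
-- ===== SOURCE A (Python) =====
-- def rev_stage3(r):
--     flag = ""
--     i = 0
--     while i < len(r):
--         try:
--             flag += r[i+1] + r[i]
--         except:
--             flag += r[i]
--         i+=2
--
--     flag = list(flag)
--     flag.reverse()
--     flag = "".join(g for g in flag)
--     return flag
-- ===== SOURCE B (Python) =====
-- def rev_stage3(r):
--     n = len(r)
--     def mate(i):
--         if i % 2 == 0:
--             return i + 1 if i + 1 < n else i
--         return i - 1
--     return ''.join(r[mate(i)] for i in reversed(range(n)))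
-- ===== Notes on version B (the rewrite author's own statement) =====
-- stated objective: faster
-- what changed: A builds a swapped string by repeated += over pairs (try/except for the odd tail) and then reverses it; B never builds an intermediate string: it computes for each output position a closed-form source index (the pair-mate of the mirrored index) and emits the characters in one reversed-index pass joined once.
import Mathlib
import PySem

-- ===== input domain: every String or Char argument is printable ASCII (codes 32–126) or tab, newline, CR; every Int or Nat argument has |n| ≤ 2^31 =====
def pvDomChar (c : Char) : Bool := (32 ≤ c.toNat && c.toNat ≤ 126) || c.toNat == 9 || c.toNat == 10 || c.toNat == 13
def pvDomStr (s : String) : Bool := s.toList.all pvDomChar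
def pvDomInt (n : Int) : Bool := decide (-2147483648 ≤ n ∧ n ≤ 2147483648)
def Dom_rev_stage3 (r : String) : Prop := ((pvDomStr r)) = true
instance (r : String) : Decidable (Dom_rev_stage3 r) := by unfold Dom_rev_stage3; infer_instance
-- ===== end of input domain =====

-- B replaces A's swap-pairs-then-reverse (built by repeated string += with try/except)
-- by a single pass over the output positions with a closed-form index map: out[j] = r[mate(n-1-j)].

-- ===== PORT A =====
-- A's while loop: at index i it appends r[i+1]+r[i], or just r[i] when r[i+1] raises
-- IndexError (exactly one character left); i advances by 2. Ported as structural
-- recursion consuming two characters per step; the final list(flag).reverse()+join is .reverse.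
def revStage3Loop : List Char → List Char
  | [] => []
  | [a] => [a]                       -- the except branch: r[i+1] raises IndexError
  | a :: b :: rest => b :: a :: revStage3Loop rest

def rev_stage3 (r : String) : String :=
  String.ofList (revStage3Loop r.toList).reverse

-- ===== PORT B =====
-- mate i = the index whose character lands at the mirror of i: the pair partner,
-- or i itself for a lone odd tail. (The index is always in range, so r[mate(i)] is getD.)
def mateIdx (n i : Nat) : Nat :=
  if i % 2 = 0 then (if i + 1 < n then i + 1 else i) else i - 1

def rev_stage3_alt (r : String) : String :=
  let l := r.toList
  let n := l.length
  String.ofList ((List.range n).reverse.map (fun i => l.getD (mateIdx n i) ' '))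

-- ===== PRECONDITION & SPEC =====
def Spec_rev_stage3 (r : String) (out : String) : Prop := out = rev_stage3_alt r
instance (r : String) (out : String) : Decidable (Spec_rev_stage3 r out) := by unfold Spec_rev_stage3; infer_instance

-- ===== CLAIM (what is proved, stated in full; the proofs are below) =====
def Claim_equal_rev_stage3 : Prop := ∀ (r : String), Dom_rev_stage3 r → Spec_rev_stage3 r (rev_stage3 r)

-- ===== LEMMAS AND PROOFS =====

theorem mateIdx_add_two (m i : Nat) : mateIdx (m + 2) (i + 2) = mateIdx m i + 2 := by
  unfold mateIdx
  have h2 : (i + 2) % 2 = i % 2 := by omega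
  rw [h2]
  split_ifs <;> omega

theorem revStage3Loop_length (l : List Char) : (revStage3Loop l).length = l.length := by
  induction l using revStage3Loop.induct <;> simp [revStage3Loop, *]

theorem revStage3Loop_getD (l : List Char) (i : Nat) (h : i < l.length) :
    (revStage3Loop l).getD i ' ' = l.getD (mateIdx l.length i) ' ' := by
  induction l using revStage3Loop.induct generalizing i with
  | case1 => simp at h
  | case2 a =>
      have hi0 : i = 0 := by simpa using h
      subst hi0
      simp [revStage3Loop, mateIdx]
  | case3 a b rest ih =>
      match i with
      | 0 => simp [revStage3Loop, mateIdx]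
      | 1 => simp [revStage3Loop, mateIdx]
      | (j + 2) =>
          have hj : j < rest.length := by simpa using h
          have hm : mateIdx (rest.length + 1 + 1) (j + 2)
              = mateIdx rest.length j + 2 := by
            simpa using mateIdx_add_two rest.length j
          simp only [revStage3Loop, List.length_cons, hm, List.getD_cons_succ]
          exact ih j hj

theorem revStage3Loop_eq_map (l : List Char) :
    revStage3Loop l = (List.range l.length).map (fun i => l.getD (mateIdx l.length i) ' ') := by
  apply List.ext_getElem
  · simp [revStage3Loop_length]
  · intro i h1 h2
    have hi : i < l.length := by simpa [revStage3Loop_length] using h1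
    have := revStage3Loop_getD l i hi
    simpa [List.getD, List.getElem?_eq_getElem, h1, h2, hi] using this

-- ===== VERDICT (by name: the statement is the Claim_ definition above) =====
theorem rev_stage3_spec : Claim_equal_rev_stage3 := by
  intro r _
  unfold Spec_rev_stage3 rev_stage3 rev_stage3_alt
  simp [revStage3Loop_eq_map, List.map_reverse]
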